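-- pv_equiv track=rewrite | github.com/alkurmtl/playnamegame | run.py | check_roots
-- ===== SOURCE A (Python) =====
-- def check_roots(root1, root2, lang):
--     if lang == 'ru':
--         TOO_SHORT = 3
--         min_len = min(len(root1), len(root2))
--         if min_len <= TOO_SHORT:
--             return root1 == root2
--         else:
--             lcp = 0
--             while lcp < min_len:
--                 if root1[lcp] == root2[lcp]:
--                     lcp += 1
--                 else:
--                     break
--             return lcp + 1 >= min_len
--     elif lang == 'en':
--         return root1 == root2
-- ===== SOURCE B (Python) =====
-- def check_roots(root1, root2, lang):
--     if lang == 'ru':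
--         m = min(len(root1), len(root2))
--         if m <= 3:
--             return root1 == root2
--         return root1[:m - 1] == root2[:m - 1]
--     elif lang == 'en':
--         return root1 == root2
-- ===== Notes on version B (the rewrite author's own statement) =====
-- stated objective: simpler
-- what changed: Replaces the explicit character-by-character while-loop LCP counter with a single closed-form prefix-slice comparison root1[:m-1] == root2[:m-1], which is equivalent to lcp + 1 >= min_len.
-- outside the precondition, e.g. on check_roots('a', 'b', 'de'): A returns None, B returns None
import Mathlib
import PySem

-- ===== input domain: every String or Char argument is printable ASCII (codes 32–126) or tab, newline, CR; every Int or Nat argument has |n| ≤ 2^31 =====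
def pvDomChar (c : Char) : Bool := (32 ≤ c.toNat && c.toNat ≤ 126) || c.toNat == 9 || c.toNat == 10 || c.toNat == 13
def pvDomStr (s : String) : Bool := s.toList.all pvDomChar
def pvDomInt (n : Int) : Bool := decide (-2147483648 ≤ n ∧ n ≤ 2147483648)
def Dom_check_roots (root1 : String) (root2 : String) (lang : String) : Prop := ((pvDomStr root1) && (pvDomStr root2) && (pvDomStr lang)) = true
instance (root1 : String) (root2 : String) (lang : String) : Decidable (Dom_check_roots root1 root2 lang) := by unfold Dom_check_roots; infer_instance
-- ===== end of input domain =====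

-- B replaces A's character-by-character while-loop LCP counter with one closed-form
-- prefix-slice comparison root1[:m-1] == root2[:m-1] (simpler decomposition, same cost).


-- ===== PORT A =====
-- the Python 'while lcp < min_len: if root1[lcp] == root2[lcp]: lcp += 1 else: break'
-- (min_len = min of the lengths, so the loop runs exactly while both lists are nonempty)
def lcpLoop (l1 l2 : List Char) (lcp : Int) : Int :=
  match l1, l2 with
  | a :: as, b :: bs => if a == b then lcpLoop as bs (lcp + 1) else lcp
  | _, _ => lcp

def check_roots (root1 : String) (root2 : String) (lang : String) : Bool :=
  if lang == "ru" then
    let min_len := min (PySem.Str.len root1) (PySem.Str.len root2)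
    if min_len ≤ 3 then root1.toList == root2.toList
    else
      let lcp := lcpLoop root1.toList root2.toList 0
      decide (lcp + 1 ≥ min_len)
  else if lang == "en" then root1.toList == root2.toList
  else false  -- Python falls through and returns None here; excluded by Pre_check_roots

-- ===== PORT B =====
def check_roots_alt (root1 : String) (root2 : String) (lang : String) : Bool :=
  if lang == "ru" then
    let m := min (PySem.Str.len root1) (PySem.Str.len root2)
    if m ≤ 3 then root1.toList == root2.toList
    else PySem.List.slice root1.toList none (some (m - 1)) ==
         PySem.List.slice root2.toList none (some (m - 1))
  else if lang == "en" then root1.toList == root2.toList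
  else false

-- ===== PRECONDITION & SPEC =====
-- Pre_ excludes only lang ∉ {'ru','en'}, where Python A falls off the end and returns None
-- (not a bool of the declared type).
def Pre_check_roots (root1 : String) (root2 : String) (lang : String) : Prop :=
  lang = "ru" ∨ lang = "en"
instance (root1 : String) (root2 : String) (lang : String) : Decidable (Pre_check_roots root1 root2 lang) := by unfold Pre_check_roots; infer_instance
def pvWitness_check_roots : String × String × String := ("abcd", "abce", "ru")

def Spec_check_roots (root1 : String) (root2 : String) (lang : String) (out : Bool) : Prop := out = check_roots_alt root1 root2 lang
instance (root1 : String) (root2 : String) (lang : String) (out : Bool) : Decidable (Spec_check_roots root1 root2 lang out) := by unfold Spec_check_roots; infer_instance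

-- ===== CLAIM (what is proved, stated in full; the proofs are below) =====
def Claim_equal_check_roots : Prop := ∀ (root1 : String) (root2 : String) (lang : String), Dom_check_roots root1 root2 lang → Pre_check_roots root1 root2 lang → Spec_check_roots root1 root2 lang (check_roots root1 root2 lang)

-- ===== LEMMAS AND PROOFS =====
lemma lcpLoop_nonneg (l1 l2 : List Char) (k : Int) (hk : 0 ≤ k) : 0 ≤ lcpLoop l1 l2 k := by
  induction l1 generalizing l2 k with
  | nil => simpa [lcpLoop] using hk
  | cons a as ih =>
    cases l2 with
    | nil => simpa [lcpLoop] using hk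
    | cons b bs =>
      simp only [lcpLoop]
      split
      · exact ih bs (k + 1) (by omega)
      · exact hk

lemma lcpLoop_shift (l1 l2 : List Char) (k : Int) :
    lcpLoop l1 l2 k = k + lcpLoop l1 l2 0 := by
  induction l1 generalizing l2 k with
  | nil => simp [lcpLoop]
  | cons a as ih =>
    cases l2 with
    | nil => simp [lcpLoop]
    | cons b bs =>
      simp only [lcpLoop]
      split
      · rw [ih bs (k + 1), ih bs (0 + 1)]; ring
      · simp

-- characterisation of the while loop: the lcp reaches n iff the first n characters agree
lemma lcpLoop_ge_iff (n : Nat) (a b : List Char)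
    (h : n ≤ min a.length b.length) :
    ((n : Int) ≤ lcpLoop a b 0 ↔ a.take n = b.take n) := by
  induction n generalizing a b with
  | zero =>
    simp [lcpLoop_nonneg a b 0 le_rfl]
  | succ n ih =>
    match a, b with
    | [], _ => simp at h
    | _ :: _, [] => simp at h
    | x :: as, y :: bs =>
      simp only [lcpLoop]
      by_cases hxy : x = y
      · have hbeq : (x == y) = true := by simp [hxy]
        rw [if_pos hbeq, lcpLoop_shift as bs (0 + 1)]
        have hmin : n ≤ min as.length bs.length := by
          simp only [List.length_cons] at h; omega
        have hih := ih as bs hmin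
        simp only [List.take_succ_cons, hxy, List.cons.injEq, true_and]
        constructor
        · intro hle
          exact hih.mp (by push_cast at hle ⊢; omega)
        · intro heq
          have := hih.mpr heq; push_cast; omega
      · have hbeq : (x == y) = false := by simp [hxy]
        rw [if_neg (by simp [hbeq])]
        constructor
        · intro hle; exfalso; push_cast at hle; omega
        · intro heq
          simp only [List.take_succ_cons, List.cons.injEq] at heq
          exact absurd heq.1 hxy

-- ===== VERDICT (by name: the statement is the Claim_ definition above) =====
theorem check_roots_spec : Claim_equal_check_roots := by
  intro root1 root2 lang _ hpre
  unfold Spec_check_roots check_roots check_roots_alt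
  rcases hpre with h | h
  · subst h
    simp only [beq_self_eq_true, if_pos]
    set a := root1.toList with ha
    set b := root2.toList with hb
    have hlen : min (PySem.Str.len root1) (PySem.Str.len root2)
        = ((min a.length b.length : Nat) : Int) := by
      simp [PySem.Str.len_eq, ha, hb]
    by_cases hsmall : min (PySem.Str.len root1) (PySem.Str.len root2) ≤ 3
    · simp only [if_pos hsmall]
    · simp only [if_neg hsmall]
      set n := min a.length b.length with hn
      have hn4 : 4 ≤ n := by rw [hlen] at hsmall; omega
      have hsl : ∀ l : List Char,
          PySem.List.slice l none (some (min (PySem.Str.len root1) (PySem.Str.len root2) - 1))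
          = l.take (n - 1) := by
        intro l
        rw [hlen]
        have : ((n : Int) - 1) = ((n - 1 : Nat) : Int) := by omega
        rw [this, PySem.List.slice_to_natCast]
      rw [hsl a, hsl b]
      have hiff := lcpLoop_ge_iff (n - 1) a b (by omega)
      have hcast : ((n - 1 : Nat) : Int) = (n : Int) - 1 := by omega
      have key : (lcpLoop a b 0 + 1 ≥ min (PySem.Str.len root1) (PySem.Str.len root2)) ↔
          (List.take (n - 1) a = List.take (n - 1) b) := by
        rw [hlen, ge_iff_le]
        constructor
        · intro hc; exact hiff.mp (by rw [hcast]; omega)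
        · intro he; have := hiff.mpr he; rw [hcast] at this; omega
      have hbd : (List.take (n - 1) a == List.take (n - 1) b)
          = decide (List.take (n - 1) a = List.take (n - 1) b) := by
        by_cases hq : List.take (n - 1) a = List.take (n - 1) b <;> simp [hq]
      rw [hbd]
      exact decide_eq_decide.mpr key
  · subst h
    simp
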